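-- pv_equiv track=rewrite | github.com/thistleknot/TrainLLMv3 | functions.py | extract_prompt_response
-- ===== SOURCE A (Python) =====
-- def extract_prompt_response(prompt):
--     human_text = None
--     gpt_text = None
--
--     for conversation in prompt['conversations']:
--         if conversation['from'] == 'human':
--             human_text = conversation['value']
--         elif conversation['from'] == 'gpt':
--             gpt_text = conversation['value']
--
--     return human_text, gpt_text
-- ===== SOURCE B (Python) =====
-- def extract_prompt_response(prompt):
--     human_text = None
--     gpt_text = None
--
--     for conversation in reversed(prompt['conversations']):
--         src = conversation['from']
--         if human_text is None and src == 'human':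
--             human_text = conversation['value']
--         elif gpt_text is None and src == 'gpt':
--             gpt_text = conversation['value']
--         if human_text is not None and gpt_text is not None:
--             break
--
--     return human_text, gpt_text
-- ===== Notes on version B (the rewrite author's own statement) =====
-- stated objective: alternative
-- what changed: Replaces A's forward overwriting scan of the whole conversation list with a reverse scan that records only the first (i.e. last overall) 'human' and 'gpt' values and breaks as soon as both are found.
import Mathlib
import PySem

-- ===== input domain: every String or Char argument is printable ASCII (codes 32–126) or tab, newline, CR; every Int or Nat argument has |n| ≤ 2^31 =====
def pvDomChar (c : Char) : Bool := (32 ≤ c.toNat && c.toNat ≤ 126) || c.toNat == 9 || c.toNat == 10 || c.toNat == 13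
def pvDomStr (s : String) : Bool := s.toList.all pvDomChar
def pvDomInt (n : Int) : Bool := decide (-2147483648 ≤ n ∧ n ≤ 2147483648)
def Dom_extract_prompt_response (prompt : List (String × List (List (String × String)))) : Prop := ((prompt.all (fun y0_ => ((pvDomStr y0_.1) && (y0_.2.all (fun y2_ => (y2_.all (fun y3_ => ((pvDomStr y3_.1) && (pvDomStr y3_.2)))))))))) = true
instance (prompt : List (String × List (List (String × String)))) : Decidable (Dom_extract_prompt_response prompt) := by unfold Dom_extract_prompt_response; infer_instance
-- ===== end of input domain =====

-- B changes the decomposition: a reverse scan keeping first matches with an early break,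
-- instead of A's forward scan overwriting on every match; return values only, no mutation.

-- Python dict access d[k] under the assoc-list convention: first-match lookup
-- (exact: dict keys are unique, so first match is the only match; none = KeyError).
def pvLookup {α : Type} : List (String × α) → String → Option α
  | [], _ => none
  | (k, v) :: rest, key => if k = key then some v else pvLookup rest key

-- ===== PORT A =====
-- one iteration of A's for-loop body (st = (human_text, gpt_text))
def stepA (st : Option String × Option String) (conversation : List (String × String)) :
    Option String × Option String :=
  if pvLookup conversation "from" = some "human" then
    (pvLookup conversation "value", st.2)
  else if pvLookup conversation "from" = some "gpt" then
    (st.1, pvLookup conversation "value")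
  else st

def extract_prompt_response (prompt : List (String × List (List (String × String)))) : Option String × Option String :=
  match pvLookup prompt "conversations" with
  | none => (none, none)  -- Python raises KeyError here; excluded by Pre_
  | some convs => convs.foldl stepA (none, none)

-- ===== PORT B =====
-- B's loop over reversed(conversations): set each slot only if still None, break when both set
def altLoop : List (List (String × String)) → Option String → Option String → Option String × Option String
  | [], h, g => (h, g)
  | c :: rest, h, g =>
    let src := pvLookup c "from"
    let st :=
      if h = none ∧ src = some "human" then (pvLookup c "value", g)
      else if g = none ∧ src = some "gpt" then (h, pvLookup c "value")
      else (h, g)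
    if st.1.isSome ∧ st.2.isSome then st else altLoop rest st.1 st.2

def extract_prompt_response_alt (prompt : List (String × List (List (String × String)))) : Option String × Option String :=
  match pvLookup prompt "conversations" with
  | none => (none, none)  -- KeyError in Python B as well; excluded by Pre_
  | some convs => altLoop convs.reverse none none

-- ===== PRECONDITION & SPEC =====
-- a conversation dict A can process without raising: 'from' present, and 'value'
-- present whenever 'from' is 'human' or 'gpt'
def okConv (c : List (String × String)) : Bool :=
  (pvLookup c "from").isSome &&
  (!((pvLookup c "from" == some "human") || (pvLookup c "from" == some "gpt")) ||
    (pvLookup c "value").isSome)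

-- Pre_ excludes exactly the inputs on which Python A raises KeyError (missing
-- 'conversations', 'from', or a needed 'value' key); A returns on everything else.
def Pre_extract_prompt_response (prompt : List (String × List (List (String × String)))) : Prop :=
  (match pvLookup prompt "conversations" with
   | none => false
   | some convs => convs.all okConv) = true

instance (prompt : List (String × List (List (String × String)))) : Decidable (Pre_extract_prompt_response prompt) := by
  unfold Pre_extract_prompt_response; infer_instance

def pvWitness_extract_prompt_response : (List (String × List (List (String × String)))) :=
  [("conversations", [[("from", "human"), ("value", "hi")], [("from", "gpt"), ("value", "hello")]])]

def Spec_extract_prompt_response (prompt : List (String × List (List (String × String)))) (out : Option String × Option String) : Prop := out = extract_prompt_response_alt prompt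
instance (prompt : List (String × List (List (String × String)))) (out : Option String × Option String) : Decidable (Spec_extract_prompt_response prompt out) := by unfold Spec_extract_prompt_response; infer_instance

-- ===== CLAIM (what is proved, stated in full; the proofs are below) =====
def Claim_equal_extract_prompt_response : Prop := ∀ (prompt : List (String × List (List (String × String)))), Dom_extract_prompt_response prompt → Pre_extract_prompt_response prompt → Spec_extract_prompt_response prompt (extract_prompt_response prompt)

-- ===== LEMMAS AND PROOFS =====

-- first-match 'or' on options (Python's 'only set if still None')
def oor : Option String → Option String → Option String
  | some a, _ => some a
  | none, b => b

-- the value of the first conversation in the list whose 'from' is tag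
def firstVal (tag : String) : List (List (String × String)) → Option String
  | [] => none
  | c :: m => if pvLookup c "from" = some tag then pvLookup c "value" else firstVal tag m

theorem oor_none_right (x : Option String) : oor x none = x := by cases x <;> rfl

theorem oor_assoc (x y z : Option String) : oor (oor x y) z = oor x (oor y z) := by
  cases x <;> rfl

theorem okConv_val {c : List (String × String)} {tag : String}
    (htag : tag = "human" ∨ tag = "gpt")
    (hok : okConv c = true) (hfrom : pvLookup c "from" = some tag) :
    (pvLookup c "value").isSome := by
  unfold okConv at hok
  rcases htag with h | h <;> subst h <;>
    simp [hfrom, Bool.and_eq_true, Bool.or_eq_true] at hok <;> exact hok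

theorem firstVal_append {tag : String} (htag : tag = "human" ∨ tag = "gpt")
    (m n : List (List (String × String)))
    (hok : ∀ c ∈ m, okConv c = true) :
    firstVal tag (m ++ n) = oor (firstVal tag m) (firstVal tag n) := by
  induction m with
  | nil => simp [firstVal, oor]
  | cons c m' ih =>
    simp only [List.cons_append, firstVal]
    by_cases hc : pvLookup c "from" = some tag
    · simp only [hc, if_pos rfl]
      have hv := okConv_val htag (hok c (by simp)) hc
      cases hval : pvLookup c "value" with
      | none => rw [hval] at hv; simp at hv
      | some v => simp [oor]
    · simp only [if_neg hc]
      exact ih (fun x hx => hok x (by simp [hx]))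

theorem foldlA_eq (l : List (List (String × String)))
    (hok : ∀ c ∈ l, okConv c = true) :
    ∀ st : Option String × Option String,
      l.foldl stepA st =
        (oor (firstVal "human" l.reverse) st.1, oor (firstVal "gpt" l.reverse) st.2) := by
  induction l with
  | nil => intro st; simp [firstVal, oor]
  | cons c rest ih =>
    intro st
    have hokr : ∀ x ∈ rest, okConv x = true := fun x hx => hok x (by simp [hx])
    have hokrev : ∀ x ∈ rest.reverse, okConv x = true := by
      intro x hx; exact hokr x (List.mem_reverse.mp hx)
    have hc : okConv c = true := hok c (by simp)
    rw [List.foldl_cons, ih hokr, List.reverse_cons,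
        firstVal_append (Or.inl rfl) _ _ hokrev,
        firstVal_append (Or.inr rfl) _ _ hokrev,
        oor_assoc, oor_assoc]
    -- reduce to a statement about one step
    have h1 : oor (firstVal "human" [c]) st.1 = (stepA st c).1 := by
      unfold firstVal stepA
      by_cases hh : pvLookup c "from" = some "human"
      · have hv := okConv_val (Or.inl rfl) hc hh
        cases hval : pvLookup c "value" with
        | none => rw [hval] at hv; simp at hv
        | some v => simp [hh, hval, oor]
      · by_cases hg : pvLookup c "from" = some "gpt" <;> simp [hh, hg, firstVal, oor]
    have h2 : oor (firstVal "gpt" [c]) st.2 = (stepA st c).2 := by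
      unfold firstVal stepA
      by_cases hg : pvLookup c "from" = some "gpt"
      · have hne : pvLookup c "from" ≠ some "human" := by rw [hg]; simp
        have hv := okConv_val (Or.inr rfl) hc hg
        cases hval : pvLookup c "value" with
        | none => rw [hval] at hv; simp at hv
        | some v => simp [hg, hne, hval, oor]
      · by_cases hh : pvLookup c "from" = some "human" <;> simp [hh, hg, firstVal, oor]
    rw [h1, h2]

theorem altLoop_eq (m : List (List (String × String)))
    (hok : ∀ c ∈ m, okConv c = true) :
    ∀ h g : Option String,
      altLoop m h g = (oor h (firstVal "human" m), oor g (firstVal "gpt" m)) := by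
  induction m with
  | nil => intro h g; simp [altLoop, firstVal, oor_none_right]
  | cons c m' ih =>
    intro h g
    have hc : okConv c = true := hok c (by simp)
    have hokm : ∀ x ∈ m', okConv x = true := fun x hx => hok x (by simp [hx])
    unfold altLoop
    have key : ∀ st : Option String × Option String,
        (if h = none ∧ pvLookup c "from" = some "human" then (pvLookup c "value", g)
         else if g = none ∧ pvLookup c "from" = some "gpt" then (h, pvLookup c "value")
         else (h, g)) = st →
        (oor st.1 (firstVal "human" m'), oor st.2 (firstVal "gpt" m')) =
        (oor h (firstVal "human" (c :: m')), oor g (firstVal "gpt" (c :: m'))) := by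
      intro st hst
      by_cases hh : h = none ∧ pvLookup c "from" = some "human"
      · rw [if_pos hh] at hst
        subst hst
        have hne : pvLookup c "from" ≠ some "gpt" := by rw [hh.2]; simp
        have hv := okConv_val (Or.inl rfl) hc hh.2
        cases hval : pvLookup c "value" with
        | none => rw [hval] at hv; simp at hv
        | some v => simp [firstVal, hh.1, hh.2, hne, hval, oor]
      · rw [if_neg hh] at hst
        by_cases hg : g = none ∧ pvLookup c "from" = some "gpt"
        · rw [if_pos hg] at hst
          subst hst
          have hne : pvLookup c "from" ≠ some "human" := by rw [hg.2]; simp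
          have hv := okConv_val (Or.inr rfl) hc hg.2
          cases hval : pvLookup c "value" with
          | none => rw [hval] at hv; simp at hv
          | some v =>
            cases h with
            | none => simp [firstVal, hg.1, hg.2, hne, hval, oor]
            | some a => simp [firstVal, hg.1, hg.2, hne, hval, oor]
        · rw [if_neg hg] at hst
          subst hst
          -- neither branch fired
          cases h with
          | some a =>
            cases g with
            | some b =>
              by_cases hgp : pvLookup c "from" = some "gpt" <;>
                by_cases hhm : pvLookup c "from" = some "human" <;>
                  simp [firstVal, hgp, hhm, oor]
            | none =>
              have hng : ¬ pvLookup c "from" = some "gpt" := fun hx => hg ⟨rfl, hx⟩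
              by_cases hhm : pvLookup c "from" = some "human" <;>
                simp [firstVal, hng, hhm, oor]
          | none =>
            have hnh : ¬ pvLookup c "from" = some "human" := fun hx => hh ⟨rfl, hx⟩
            cases g with
            | some b =>
              by_cases hgp : pvLookup c "from" = some "gpt" <;>
                simp [firstVal, hnh, hgp, oor]
            | none =>
              have hng : ¬ pvLookup c "from" = some "gpt" := fun hx => hg ⟨rfl, hx⟩
              simp [firstVal, hnh, hng, oor]
    by_cases hbrk :
        ((if h = none ∧ pvLookup c "from" = some "human" then (pvLookup c "value", g)
          else if g = none ∧ pvLookup c "from" = some "gpt" then (h, pvLookup c "value")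
          else (h, g)) : Option String × Option String).1.isSome = true ∧
        ((if h = none ∧ pvLookup c "from" = some "human" then (pvLookup c "value", g)
          else if g = none ∧ pvLookup c "from" = some "gpt" then (h, pvLookup c "value")
          else (h, g)) : Option String × Option String).2.isSome = true
    · rw [if_pos hbrk]
      have := key _ rfl
      rcases hbrk with ⟨h1, h2⟩
      -- st with both components some: oor st.i X = st.i
      have e1 : ∀ (x : Option String) (Y : Option String), x.isSome = true → oor x Y = x := by
        intro x Y hx; cases x with | none => simp at hx | some a => rfl
      rw [← this]
      exact Prod.ext (e1 _ _ h1).symm (e1 _ _ h2).symm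
    · rw [if_neg hbrk, ih hokm]
      exact key _ rfl

-- ===== VERDICT (by name: the statement is the Claim_ definition above) =====
theorem extract_prompt_response_spec : Claim_equal_extract_prompt_response := by
  intro prompt _ hpre
  unfold Spec_extract_prompt_response
  unfold Pre_extract_prompt_response at hpre
  unfold extract_prompt_response extract_prompt_response_alt
  cases hconv : pvLookup prompt "conversations" with
  | none => rw [hconv] at hpre
  | some convs =>
    rw [hconv] at hpre
    have hok : ∀ c ∈ convs, okConv c = true := by
      simpa [List.all_eq_true] using hpre
    have hokrev : ∀ c ∈ convs.reverse, okConv c = true := by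
      intro c hcm; exact hok c (List.mem_reverse.mp hcm)
    show convs.foldl stepA (none, none) = altLoop convs.reverse none none
    rw [foldlA_eq convs hok (none, none), altLoop_eq convs.reverse hokrev none none,
        oor_none_right, oor_none_right]
    rfl
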